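-- pv_equiv track=rewrite | github.com/frostiz/tek3 | Security/SEC_crypto_2018/ex06/break_rk.py | transposeText
-- ===== SOURCE A (Python) =====
-- def transposeText(probableKeysize, cutted):
-- 	blocks = []
-- 	for i in range(probableKeysize):
-- 		transposed = b''
-- 		for block in cutted:
-- 			try:
-- 				transposed += bytes(block[i], "utf8")
-- 			except:
-- 				transposed += bytes("", "utf8")
-- 		blocks.append(transposed.decode("utf8").replace("'", ""))
-- 	return blocks
-- ===== SOURCE B (Python) =====
-- def transposeText(probableKeysize, cutted):
--     # Row-major single pass: walk each block once, dealing its characters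
--     # into per-column accumulators, instead of A's column-major indexing
--     # with try/except.
--     n = max(0, probableKeysize)
--     cols = [[] for _ in range(n)]
--     for block in cutted:
--         for i, ch in enumerate(block[:n]):
--             cols[i].append(ch)
--     return [''.join(c).replace("'", "") for c in cols]
-- ===== Notes on version B (the rewrite author's own statement) =====
-- stated objective: faster
-- what changed: Replaces A's column-major nested loop (indexing block[i] under try/except and re-scanning every block for every column) by a single row-major pass that walks each block once, dealing its characters into per-column accumulators, then joins each column.
import Mathlib
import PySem

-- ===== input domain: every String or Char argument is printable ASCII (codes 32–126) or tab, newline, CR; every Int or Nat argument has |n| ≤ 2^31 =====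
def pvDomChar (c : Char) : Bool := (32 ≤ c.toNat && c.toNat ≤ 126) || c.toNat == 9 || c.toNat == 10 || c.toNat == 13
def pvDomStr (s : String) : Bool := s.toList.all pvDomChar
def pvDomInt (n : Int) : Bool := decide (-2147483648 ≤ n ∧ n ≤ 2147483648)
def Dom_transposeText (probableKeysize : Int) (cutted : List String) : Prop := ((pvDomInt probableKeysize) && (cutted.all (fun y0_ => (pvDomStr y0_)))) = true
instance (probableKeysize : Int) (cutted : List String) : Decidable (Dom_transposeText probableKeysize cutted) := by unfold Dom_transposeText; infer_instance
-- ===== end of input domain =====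

-- B replaces A's column-major indexing with try/except by one row-major pass
-- dealing each block's characters into per-column accumulators (measured faster).

-- ===== PORT A =====
-- bytes(·, "utf8") / .decode("utf8") is the identity round-trip on the Dom's ASCII
-- strings; the byte accumulator is modeled as a List Char (exact on Dom).
def transposeText (probableKeysize : Int) (cutted : List String) : List String :=
  (PySem.List.pyRange 0 probableKeysize).foldl
    (fun blocks i =>
      let transposed : List Char :=
        cutted.foldl
          (fun t block =>
            t ++ (match PySem.Str.pyGet? block i with
                  | some c => [c]          -- try: transposed += bytes(block[i], "utf8")
                  | none => []))           -- except: transposed += bytes("", "utf8")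
          []
      blocks ++ [PySem.Str.replace (String.mk transposed) "'" ""])
    []

-- ===== PORT B =====
-- cols[i].append(ch) for i, ch in enumerate(block[:n]): deal chars positionally
def pvDeal : List (List Char) → List Char → List (List Char)
  | cols, [] => cols
  | [], _ :: _ => []
  | c :: cs, ch :: chs => (c ++ [ch]) :: pvDeal cs chs

def transposeText_alt (probableKeysize : Int) (cutted : List String) : List String :=
  let n : Int := max 0 probableKeysize
  let cols :=
    cutted.foldl
      (fun cols block => pvDeal cols (PySem.Str.slice block none (some n)).toList)
      (List.replicate n.toNat ([] : List Char))
  cols.map (fun c => PySem.Str.replace (String.mk c) "'" "")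

-- ===== PRECONDITION & SPEC =====
def Spec_transposeText (probableKeysize : Int) (cutted : List String) (out : List String) : Prop := out = transposeText_alt probableKeysize cutted
instance (probableKeysize : Int) (cutted : List String) (out : List String) : Decidable (Spec_transposeText probableKeysize cutted out) := by unfold Spec_transposeText; infer_instance

-- ===== CLAIM (what is proved, stated in full; the proofs are below) =====
def Claim_equal_transposeText : Prop := ∀ (probableKeysize : Int) (cutted : List String), Dom_transposeText probableKeysize cutted → Spec_transposeText probableKeysize cutted (transposeText probableKeysize cutted)

-- ===== LEMMAS AND PROOFS =====

-- the one character (as a 0/1-element list) block contributes to column i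
def pvPick (l : List Char) (i : Nat) : List Char :=
  match l[i]? with
  | some c => [c]
  | none => []

-- the full column i, block by block
def pvCol : List String → Nat → List Char
  | [], _ => []
  | b :: bs, i => pvPick b.toList i ++ pvCol bs i

theorem pvCol_foldl (bs : List String) (i : Nat) (acc : List Char) :
    bs.foldl (fun t block => t ++ pvPick block.toList i) acc = acc ++ pvCol bs i := by
  induction bs generalizing acc with
  | nil => simp [pvCol]
  | cons b bs ih => simp [pvCol, ih, List.append_assoc]

theorem pvDeal_nil (cols : List (List Char)) : pvDeal cols [] = cols := by
  cases cols <;> rfl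

theorem pyRange_zero_eq (k : Int) :
    PySem.List.pyRange 0 k = (List.range k.toNat).map (fun j : Nat => (j : Int)) := by
  by_cases h : 0 ≤ k
  · rw [← Int.toNat_of_nonneg h, PySem.List.pyRange_zero_natCast, Int.toNat_natCast]
  · have h0 : k.toNat = 0 := by omega
    rw [h0]
    refine List.eq_nil_iff_forall_not_mem.mpr (fun x hx => ?_)
    have := (PySem.List.mem_pyRange_one).mp hx
    omega

theorem transposeText_eq_spec (k : Int) (cutted : List String) :
    transposeText k cutted =
      (List.range k.toNat).map
        (fun i => PySem.Str.replace (String.mk (pvCol cutted i)) "'" "") := by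
  unfold transposeText
  rw [pyRange_zero_eq, PySem.List.foldl_append_singleton_eq_map, List.nil_append,
    List.map_map]
  refine List.map_congr_left (fun i _ => ?_)
  simp only [Function.comp, PySem.Str.pyGet?_natCast]
  show PySem.Str.replace
      (String.mk (cutted.foldl (fun t block => t ++ pvPick block.toList i) [])) "'" "" = _
  rw [pvCol_foldl, List.nil_append]

theorem pvDeal_map (chs : List Char) (m : Nat) (g : Nat → List Char) :
    pvDeal ((List.range m).map g) chs
      = (List.range m).map (fun i => g i ++ pvPick chs i) := by
  induction chs generalizing m g with
  | nil =>
      rw [pvDeal_nil]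
      refine (List.map_congr_left (fun i _ => ?_)).symm
      simp [pvPick]
  | cons ch chs ih =>
      cases m with
      | zero => simp [pvDeal]
      | succ m =>
          rw [List.range_succ_eq_map, List.map_cons, List.map_cons, List.map_map,
            List.map_map]
          show (g 0 ++ [ch]) :: pvDeal ((List.range m).map _) chs = _
          rw [ih]
          refine congrArg₂ _ ?_ (List.map_congr_left (fun i _ => ?_)) <;>
            simp [pvPick, Function.comp]

theorem pvFold_cols (bs : List String) (t : Nat) (g : Nat → List Char) :
    bs.foldl (fun cols block => pvDeal cols (block.toList.take t)) ((List.range t).map g)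
      = (List.range t).map (fun i => g i ++ pvCol bs i) := by
  induction bs generalizing g with
  | nil => simp [pvCol]
  | cons b bs ih =>
      rw [List.foldl_cons, pvDeal_map, ih]
      refine List.map_congr_left (fun i hi => ?_)
      have hi' : i < t := List.mem_range.mp hi
      have : pvPick (b.toList.take t) i = pvPick b.toList i := by
        simp [pvPick, List.getElem?_take_of_lt hi']
      rw [this, pvCol, List.append_assoc]

theorem transposeText_alt_eq_spec (k : Int) (cutted : List String) :
    transposeText_alt k cutted =
      (List.range k.toNat).map
        (fun i => PySem.Str.replace (String.mk (pvCol cutted i)) "'" "") := by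
  unfold transposeText_alt
  have hn : (max 0 k) = ((k.toNat : Nat) : Int) := by omega
  have htn : (max 0 k).toNat = k.toNat := by omega
  simp only [hn, Int.toNat_natCast]
  have hslice : ∀ b : String,
      (PySem.Str.slice b none (some ((k.toNat : Nat) : Int))).toList
        = b.toList.take k.toNat := by
    intro b; simp [pysem]; omega
  have hrep : List.replicate k.toNat ([] : List Char)
      = (List.range k.toNat).map (fun _ => ([] : List Char)) := by
    simp [List.map_const']
  rw [show (fun (cols : List (List Char)) (block : String) =>
        pvDeal cols (PySem.Str.slice block none (some ((k.toNat : Nat) : Int))).toList)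
      = (fun cols block => pvDeal cols (block.toList.take k.toNat)) from
      funext fun cols => funext fun block => by rw [hslice],
    hrep, pvFold_cols, List.map_map]
  refine List.map_congr_left (fun i _ => ?_)
  simp [Function.comp]

-- ===== VERDICT (by name: the statement is the Claim_ definition above) =====
theorem transposeText_spec : Claim_equal_transposeText := by
  intro k cutted _
  unfold Spec_transposeText
  rw [transposeText_eq_spec, transposeText_alt_eq_spec]
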